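-- pv_equiv track=rewrite | github.com/AlgoMathITMO/public-transport-network | ptn/osm.py | is_administrative
-- ===== SOURCE A (Python) =====
-- from typing import List, Tuple
--
-- def is_any_pair_present(tags: dict, items: List[Tuple[str, str]]) -> bool:
--     return isinstance(tags, dict) \
--            and any((key, value) in items for key, value in tags.items())
--
-- def is_administrative(tags: dict) -> bool:
--     items = [
--         ('leisure', 'community_centre'),
--     ]
--     items += [('office', val) for val in ['diplomatic', 'ngo', 'organisation', 'administrative',
--                                           'estate_agent', 'fire_department', 'association',
--                                           'military', 'government']]
--     items += [('amenity', val) for val in ['police', 'community_centre', 'fire_station',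
--                                            'courthouse', 'public_service', 'social_facility',
--                                            'arts_centre', 'townhall', 'register_office', 'embassy']]
--
--     return is_any_pair_present(tags, items)
-- ===== SOURCE B (Python) =====
-- _ADMIN_ITEMS = [
--     ('leisure', 'community_centre'),
--     ('office', 'diplomatic'), ('office', 'ngo'), ('office', 'organisation'),
--     ('office', 'administrative'), ('office', 'estate_agent'),
--     ('office', 'fire_department'), ('office', 'association'),
--     ('office', 'military'), ('office', 'government'),
--     ('amenity', 'police'), ('amenity', 'community_centre'),
--     ('amenity', 'fire_station'), ('amenity', 'courthouse'),
--     ('amenity', 'public_service'), ('amenity', 'social_facility'),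
--     ('amenity', 'arts_centre'), ('amenity', 'townhall'),
--     ('amenity', 'register_office'), ('amenity', 'embassy'),
-- ]
--
-- def is_administrative(tags: dict) -> bool:
--     return isinstance(tags, dict) and any(tags.get(k) == v for k, v in _ADMIN_ITEMS)
-- ===== Notes on version B (the rewrite author's own statement) =====
-- stated objective: faster
-- what changed: Reverses the traversal: instead of scanning every tag and testing membership in the 20-entry allow-list, B scans the fixed allow-list once and probes the tags dict with tags.get(k) == v, so the work is a constant 20 dict lookups independent of the number of tags.
import Mathlib
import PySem

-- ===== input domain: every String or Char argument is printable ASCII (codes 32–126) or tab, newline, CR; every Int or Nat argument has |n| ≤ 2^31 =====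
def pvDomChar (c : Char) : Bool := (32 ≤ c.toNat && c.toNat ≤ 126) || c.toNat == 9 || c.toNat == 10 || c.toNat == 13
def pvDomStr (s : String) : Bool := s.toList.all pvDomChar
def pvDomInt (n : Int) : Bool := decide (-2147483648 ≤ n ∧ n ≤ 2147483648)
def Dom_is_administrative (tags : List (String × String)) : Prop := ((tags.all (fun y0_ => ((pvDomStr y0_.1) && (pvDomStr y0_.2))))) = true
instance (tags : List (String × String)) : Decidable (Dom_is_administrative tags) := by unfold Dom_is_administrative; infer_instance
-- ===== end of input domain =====

-- B reverses the traversal: it scans the fixed allow-list and probes the tags dict by key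
-- lookup, instead of scanning the tags and testing membership in the allow-list (alternative).


-- ===== PORT A =====
def is_any_pair_present (tags : List (String × String)) (items : List (String × String)) : Bool :=
  tags.any (fun kv => items.contains kv)

def is_administrative (tags : List (String × String)) : Bool :=
  let items : List (String × String) := [("leisure", "community_centre")]
  let items := items ++ (["diplomatic", "ngo", "organisation", "administrative",
                          "estate_agent", "fire_department", "association",
                          "military", "government"].map (fun v => ("office", v)))
  let items := items ++ (["police", "community_centre", "fire_station",
                          "courthouse", "public_service", "social_facility",
                          "arts_centre", "townhall", "register_office", "embassy"].map (fun v => ("amenity", v)))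
  is_any_pair_present tags items

-- ===== PORT B =====
def adminItems : List (String × String) :=
  [("leisure", "community_centre"),
   ("office", "diplomatic"), ("office", "ngo"), ("office", "organisation"),
   ("office", "administrative"), ("office", "estate_agent"),
   ("office", "fire_department"), ("office", "association"),
   ("office", "military"), ("office", "government"),
   ("amenity", "police"), ("amenity", "community_centre"),
   ("amenity", "fire_station"), ("amenity", "courthouse"),
   ("amenity", "public_service"), ("amenity", "social_facility"),
   ("amenity", "arts_centre"), ("amenity", "townhall"),
   ("amenity", "register_office"), ("amenity", "embassy")]

def is_administrative_alt (tags : List (String × String)) : Bool :=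
  adminItems.any (fun kv => (PySem.Dict.mk tags).get? kv.1 == some kv.2)

-- ===== PRECONDITION & SPEC =====
-- Pre_ states the dict invariant: the association list stands for a Python dict, whose keys
-- are necessarily distinct; duplicate-key lists correspond to no Python input of A.
def Pre_is_administrative (tags : List (String × String)) : Prop :=
  (tags.map Prod.fst).Nodup
instance (tags : List (String × String)) : Decidable (Pre_is_administrative tags) := by
  unfold Pre_is_administrative; infer_instance

def pvWitness_is_administrative : (List (String × String)) :=
  [("amenity", "police"), ("name", "station 4")]

def Spec_is_administrative (tags : List (String × String)) (out : Bool) : Prop := out = is_administrative_alt tags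
instance (tags : List (String × String)) (out : Bool) : Decidable (Spec_is_administrative tags out) := by unfold Spec_is_administrative; infer_instance

-- ===== CLAIM (what is proved, stated in full; the proofs are below) =====
def Claim_equal_is_administrative : Prop := ∀ (tags : List (String × String)), Dom_is_administrative tags → Pre_is_administrative tags → Spec_is_administrative tags (is_administrative tags)

-- ===== LEMMAS AND PROOFS =====

theorem items_eq :
    ([(("leisure" : String), ("community_centre" : String))] ++
       (["diplomatic", "ngo", "organisation", "administrative",
         "estate_agent", "fire_department", "association",
         "military", "government"].map (fun v => (("office" : String), v))) ++
       (["police", "community_centre", "fire_station",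
         "courthouse", "public_service", "social_facility",
         "arts_centre", "townhall", "register_office", "embassy"].map (fun v => (("amenity" : String), v)))) = adminItems := by rfl

-- ===== VERDICT (by name: the statement is the Claim_ definition above) =====
theorem is_administrative_spec : Claim_equal_is_administrative := by
  intro tags _hdom hpre
  unfold Spec_is_administrative
  have hnd : (PySem.Dict.mk tags).keys.Nodup := by
    simpa [PySem.Dict.keys, PySem.Dict.items] using hpre
  show is_any_pair_present tags _ = _
  rw [items_eq]
  rw [Bool.eq_iff_iff]
  simp only [is_any_pair_present, is_administrative_alt, List.any_eq_true,
    List.contains_eq_mem, decide_eq_true_eq, beq_iff_eq,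
    PySem.Dict.get?_eq_some_iff_mem_items _ _ _ hnd, Prod.mk.eta]
  constructor
  · rintro ⟨kv, htags, hitems⟩
    exact ⟨kv, hitems, htags⟩
  · rintro ⟨kv, hitems, htags⟩
    exact ⟨kv, htags, hitems⟩
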